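-- pv_equiv track=rewrite | github.com/Zzhaoo/NJU-2021-LCYOJ | 4/4-2.py | solute
-- ===== SOURCE A (Python) =====
-- def solute(n: int):
--     C_arr = [0, 0, 1, 1, 1, 0, 1]
--     count = 0
--     for i in range(1, n + 1):
--         for j in range(1, n + 1):
--             if C_arr[(i % 7 * j % 7) ** 3 % 7] == 1:  # 这样求余防止溢出,
--                 count += 1
--     return count
-- ===== SOURCE B (Python) =====
-- def solute(n: int):
--     C = [0, 0, 1, 1, 1, 0, 1]
--     m = n if n > 0 else 0
--     cnt = [(m - r) // 7 - (-r) // 7 for r in range(7)]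
--     total = 0
--     for r, cr in enumerate(cnt):
--         for s, cs in enumerate(cnt):
--             if C[(r * s) ** 3 % 7] == 1:
--                 total += cr * cs
--     return total
-- ===== Notes on version B (the rewrite author's own statement) =====
-- stated objective: faster
-- what changed: Replaced the quadratic double loop over all pairs with a constant-time computation: count how many loop indices fall in each residue class modulo seven by a closed-form floor-division formula, then sum cnt[r]*cnt[s] over the residue pairs satisfying the predicate.
import Mathlib
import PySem

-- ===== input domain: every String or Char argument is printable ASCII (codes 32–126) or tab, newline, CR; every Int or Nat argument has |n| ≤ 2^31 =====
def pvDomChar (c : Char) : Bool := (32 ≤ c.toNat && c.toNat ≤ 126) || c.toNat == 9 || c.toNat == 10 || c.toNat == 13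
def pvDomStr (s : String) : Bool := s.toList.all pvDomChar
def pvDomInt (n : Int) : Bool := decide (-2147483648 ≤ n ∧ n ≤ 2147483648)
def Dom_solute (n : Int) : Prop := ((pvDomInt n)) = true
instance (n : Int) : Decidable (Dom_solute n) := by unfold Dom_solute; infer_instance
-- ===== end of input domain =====

-- B replaces A's O(n^2) pair scan by an O(1) residue-class count: cnt[r] = #{i in 1..n : i % 7 = r}
-- via floor division, then sums cnt[r]*cnt[s] over the 49 residue pairs passing the predicate.

-- ===== PORT A =====
def solute (n : Int) : Int :=
  let C_arr : List Int := [0, 0, 1, 1, 1, 0, 1]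
  (PySem.List.pyRange 1 (n + 1) 1).foldl (fun count i =>
    (PySem.List.pyRange 1 (n + 1) 1).foldl (fun count j =>
      if PySem.List.pyGet? C_arr (PySem.Int.mod ((PySem.Int.mod (PySem.Int.mod i 7 * j) 7) ^ 3) 7) = some 1
      then count + 1 else count) count) 0

-- ===== PORT B =====
def solute_alt (n : Int) : Int :=
  let C : List Int := [0, 0, 1, 1, 1, 0, 1]
  let m : Int := if n > 0 then n else 0
  let cnt : List Int := (PySem.List.pyRange 0 7 1).map (fun r =>
    PySem.Int.floordiv (m - r) 7 - PySem.Int.floordiv (-r) 7)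
  (PySem.List.enumerate cnt).foldl (fun total rc =>
    (PySem.List.enumerate cnt).foldl (fun total sc =>
      if PySem.List.pyGet? C (PySem.Int.mod ((rc.1 * sc.1) ^ 3) 7) = some 1
      then total + rc.2 * sc.2 else total) total) 0

-- ===== PRECONDITION & SPEC =====
def Spec_solute (n : Int) (out : Int) : Prop := out = solute_alt n
instance (n : Int) (out : Int) : Decidable (Spec_solute n out) := by unfold Spec_solute; infer_instance

-- ===== CLAIM (what is proved, stated in full; the proofs are below) =====
def Claim_equal_solute : Prop := ∀ (n : Int), Dom_solute n → Spec_solute n (solute n)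

-- ===== LEMMAS AND PROOFS =====

-- helper definitions used only by the proofs
def pvC7 : List Int := [0, 0, 1, 1, 1, 0, 1]

def pvInd (r s : Int) : Int :=
  if PySem.List.pyGet? pvC7 ((r * s) ^ 3 % 7) = some 1 then 1 else 0

def pvCnt (n r : Int) : Int := (max n 0 - r) / 7 - (-r) / 7

def pvG (n r : Int) : Int :=
  pvCnt n 0 * pvInd r 0 + pvCnt n 1 * pvInd r 1 + pvCnt n 2 * pvInd r 2 +
  pvCnt n 3 * pvInd r 3 + pvCnt n 4 * pvInd r 4 + pvCnt n 5 * pvInd r 5 + pvCnt n 6 * pvInd r 6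

lemma pvCnt_succ (m r : Int) (hm : 0 ≤ m) (h1 : 0 ≤ r) (h2 : r < 7) :
    pvCnt (m + 1) r = pvCnt m r + (if (m + 1) % 7 = r then 1 else 0) := by
  unfold pvCnt; split_ifs with h <;> omega

lemma pvSum_nat (g : Int → Int) (m : Nat) :
    ((PySem.List.pyRange 1 ((m : Int) + 1) 1).map (fun i => g (i % 7))).sum =
      pvCnt m 0 * g 0 + pvCnt m 1 * g 1 + pvCnt m 2 * g 2 + pvCnt m 3 * g 3 +
      pvCnt m 4 * g 4 + pvCnt m 5 * g 5 + pvCnt m 6 * g 6 := by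
  induction m with
  | zero =>
      rw [show ((0 : Nat) : Int) + 1 = 1 by norm_num,
        PySem.List.pyRange_one_eq_nil (by norm_num)]
      have hz : ∀ r : Int, pvCnt 0 r = 0 := by intro r; unfold pvCnt; omega
      simp [hz]
  | succ m ih =>
      rw [show ((m + 1 : Nat) : Int) + 1 = ((m : Int) + 1) + 1 by push_cast; ring,
        PySem.List.pyRange_one_succ_right (by omega)]
      rw [List.map_append, List.sum_append, ih]
      simp only [List.map_cons, List.map_nil, List.sum_cons, List.sum_nil, add_zero]
      have hm : (0 : Int) ≤ (m : Int) := by positivity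
      rw [show ((m + 1 : Nat) : Int) = (m : Int) + 1 by push_cast; ring]
      rw [pvCnt_succ _ 0 hm (by norm_num) (by norm_num),
          pvCnt_succ _ 1 hm (by norm_num) (by norm_num),
          pvCnt_succ _ 2 hm (by norm_num) (by norm_num),
          pvCnt_succ _ 3 hm (by norm_num) (by norm_num),
          pvCnt_succ _ 4 hm (by norm_num) (by norm_num),
          pvCnt_succ _ 5 hm (by norm_num) (by norm_num),
          pvCnt_succ _ 6 hm (by norm_num) (by norm_num)]
      have he : ((m : Int) + 1) % 7 = 0 ∨ ((m : Int) + 1) % 7 = 1 ∨ ((m : Int) + 1) % 7 = 2 ∨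
          ((m : Int) + 1) % 7 = 3 ∨ ((m : Int) + 1) % 7 = 4 ∨ ((m : Int) + 1) % 7 = 5 ∨
          ((m : Int) + 1) % 7 = 6 := by omega
      rcases he with h | h | h | h | h | h | h <;> rw [h] <;> simp <;> ring

lemma pvSum (g : Int → Int) (n : Int) :
    ((PySem.List.pyRange 1 (n + 1) 1).map (fun i => g (i % 7))).sum =
      pvCnt n 0 * g 0 + pvCnt n 1 * g 1 + pvCnt n 2 * g 2 + pvCnt n 3 * g 3 +
      pvCnt n 4 * g 4 + pvCnt n 5 * g 5 + pvCnt n 6 * g 6 := by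
  rcases (by omega : n ≤ 0 ∨ 0 < n) with hn | hn
  · rw [PySem.List.pyRange_one_eq_nil (by omega)]
    have hz : ∀ r : Int, pvCnt n r = 0 := by intro r; unfold pvCnt; omega
    simp [hz]
  · have h : n = ((n.toNat : Int)) := by omega
    rw [h, pvSum_nat]

lemma pvMulMod (i j : Int) : (i % 7 * j) % 7 = (i % 7 * (j % 7)) % 7 := by
  conv_lhs => rw [Int.mul_emod]
  conv_rhs => rw [Int.mul_emod]
  simp [Int.emod_emod_of_dvd]

lemma pvCond (i j : Int) : ((i % 7 * j) % 7) ^ 3 % 7 = (i % 7 * (j % 7)) ^ 3 % 7 := by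
  have h1 : Int.ModEq 7 ((i % 7 * j) % 7) (i % 7 * (j % 7)) := by
    unfold Int.ModEq
    rw [Int.emod_emod_of_dvd _ dvd_rfl]
    exact pvMulMod i j
  exact h1.pow 3

lemma pvA_eq (n : Int) :
    solute n = pvCnt n 0 * pvG n 0 + pvCnt n 1 * pvG n 1 + pvCnt n 2 * pvG n 2 +
      pvCnt n 3 * pvG n 3 + pvCnt n 4 * pvG n 4 + pvCnt n 5 * pvG n 5 + pvCnt n 6 * pvG n 6 := by
  have hmod : ∀ a : Int, PySem.Int.mod a 7 = a % 7 := fun a =>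
    PySem.Int.mod_eq_emod_of_pos (by norm_num)
  have hinner : ∀ (i c : Int),
      (PySem.List.pyRange 1 (n + 1) 1).foldl (fun count j =>
        if PySem.List.pyGet? [(0 : Int), 0, 1, 1, 1, 0, 1]
            (PySem.Int.mod ((PySem.Int.mod (PySem.Int.mod i 7 * j) 7) ^ 3) 7) = some 1
        then count + 1 else count) c =
      c + ((PySem.List.pyRange 1 (n + 1) 1).map (fun j => pvInd (i % 7) (j % 7))).sum := by
    intro i c
    rw [show (fun (count j : Int) =>
        if PySem.List.pyGet? [(0 : Int), 0, 1, 1, 1, 0, 1]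
            (PySem.Int.mod ((PySem.Int.mod (PySem.Int.mod i 7 * j) 7) ^ 3) 7) = some 1
        then count + 1 else count) =
        (fun (count j : Int) => count + pvInd (i % 7) (j % 7)) from ?_]
    · exact PySem.List.foldl_add _ _ _
    · funext c j
      simp only [hmod]
      rw [pvCond i j]
      unfold pvInd pvC7
      split_ifs <;> simp
  have houter :
      (PySem.List.pyRange 1 (n + 1) 1).foldl (fun count i =>
        (PySem.List.pyRange 1 (n + 1) 1).foldl (fun count j =>
          if PySem.List.pyGet? [(0 : Int), 0, 1, 1, 1, 0, 1]
              (PySem.Int.mod ((PySem.Int.mod (PySem.Int.mod i 7 * j) 7) ^ 3) 7) = some 1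
          then count + 1 else count) count) 0 =
      pvCnt n 0 * pvG n 0 + pvCnt n 1 * pvG n 1 + pvCnt n 2 * pvG n 2 +
      pvCnt n 3 * pvG n 3 + pvCnt n 4 * pvG n 4 + pvCnt n 5 * pvG n 5 + pvCnt n 6 * pvG n 6 := by
    rw [show (fun (count i : Int) =>
        (PySem.List.pyRange 1 (n + 1) 1).foldl (fun count j =>
          if PySem.List.pyGet? [(0 : Int), 0, 1, 1, 1, 0, 1]
              (PySem.Int.mod ((PySem.Int.mod (PySem.Int.mod i 7 * j) 7) ^ 3) 7) = some 1
          then count + 1 else count) count) =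
        (fun (count i : Int) => count + pvG n (i % 7)) from ?_]
    · rw [PySem.List.foldl_add, zero_add, pvSum (pvG n) n]
    · funext c i
      rw [hinner i c, pvSum (pvInd (i % 7)) n, pvG]
  simpa only [solute] using houter

lemma pvB_gen (c0 c1 c2 c3 c4 c5 c6 : Int) :
    (PySem.List.enumerate [c0, c1, c2, c3, c4, c5, c6]).foldl (fun total rc =>
      (PySem.List.enumerate [c0, c1, c2, c3, c4, c5, c6]).foldl (fun total sc =>
        if PySem.List.pyGet? [(0 : Int), 0, 1, 1, 1, 0, 1]
            (PySem.Int.mod ((rc.1 * sc.1) ^ 3) 7) = some 1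
        then total + rc.2 * sc.2 else total) total) 0 =
    c0 * (c0 * pvInd 0 0 + c1 * pvInd 0 1 + c2 * pvInd 0 2 + c3 * pvInd 0 3 + c4 * pvInd 0 4 + c5 * pvInd 0 5 + c6 * pvInd 0 6) +
    c1 * (c0 * pvInd 1 0 + c1 * pvInd 1 1 + c2 * pvInd 1 2 + c3 * pvInd 1 3 + c4 * pvInd 1 4 + c5 * pvInd 1 5 + c6 * pvInd 1 6) +
    c2 * (c0 * pvInd 2 0 + c1 * pvInd 2 1 + c2 * pvInd 2 2 + c3 * pvInd 2 3 + c4 * pvInd 2 4 + c5 * pvInd 2 5 + c6 * pvInd 2 6) +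
    c3 * (c0 * pvInd 3 0 + c1 * pvInd 3 1 + c2 * pvInd 3 2 + c3 * pvInd 3 3 + c4 * pvInd 3 4 + c5 * pvInd 3 5 + c6 * pvInd 3 6) +
    c4 * (c0 * pvInd 4 0 + c1 * pvInd 4 1 + c2 * pvInd 4 2 + c3 * pvInd 4 3 + c4 * pvInd 4 4 + c5 * pvInd 4 5 + c6 * pvInd 4 6) +
    c5 * (c0 * pvInd 5 0 + c1 * pvInd 5 1 + c2 * pvInd 5 2 + c3 * pvInd 5 3 + c4 * pvInd 5 4 + c5 * pvInd 5 5 + c6 * pvInd 5 6) +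
    c6 * (c0 * pvInd 6 0 + c1 * pvInd 6 1 + c2 * pvInd 6 2 + c3 * pvInd 6 3 + c4 * pvInd 6 4 + c5 * pvInd 6 5 + c6 * pvInd 6 6) := by
  have hmod : ∀ a : Int, PySem.Int.mod a 7 = a % 7 := fun a =>
    PySem.Int.mod_eq_emod_of_pos (by norm_num)
  have hE : PySem.List.enumerate [c0, c1, c2, c3, c4, c5, c6] =
      [((0 : Int), c0), (1, c1), (2, c2), (3, c3), (4, c4), (5, c5), (6, c6)] := by
    simp [PySem.List.enumerate_cons, PySem.List.enumerate_nil]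
  rw [hE]
  have hfun : ∀ r cr : Int,
      (fun (t : Int) (sc : Int × Int) =>
        if PySem.List.pyGet? [(0 : Int), 0, 1, 1, 1, 0, 1]
            (PySem.Int.mod ((r * sc.1) ^ 3) 7) = some 1
        then t + cr * sc.2 else t) =
      (fun t sc => t + cr * sc.2 * pvInd r sc.1) := by
    intro r cr; funext t sc
    rw [hmod]; unfold pvInd pvC7
    split_ifs with h <;> ring
  have hinner : ∀ (r cr t : Int),
      ([((0 : Int), c0), (1, c1), (2, c2), (3, c3), (4, c4), (5, c5), (6, c6)]).foldl
        (fun (t : Int) (sc : Int × Int) =>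
          if PySem.List.pyGet? [(0 : Int), 0, 1, 1, 1, 0, 1]
              (PySem.Int.mod ((r * sc.1) ^ 3) 7) = some 1
          then t + cr * sc.2 else t) t =
      t + (c0 * pvInd r 0 + c1 * pvInd r 1 + c2 * pvInd r 2 + c3 * pvInd r 3 +
           c4 * pvInd r 4 + c5 * pvInd r 5 + c6 * pvInd r 6) * cr := by
    intro r cr t
    rw [hfun r cr, PySem.List.foldl_add]
    simp only [List.map_cons, List.map_nil, List.sum_cons, List.sum_nil]
    ring
  rw [show (fun (total : Int) (rc : Int × Int) =>
      ([((0 : Int), c0), (1, c1), (2, c2), (3, c3), (4, c4), (5, c5), (6, c6)]).foldl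
        (fun (t : Int) (sc : Int × Int) =>
          if PySem.List.pyGet? [(0 : Int), 0, 1, 1, 1, 0, 1]
              (PySem.Int.mod ((rc.1 * sc.1) ^ 3) 7) = some 1
          then t + rc.2 * sc.2 else t) total) =
      (fun total rc => total + (c0 * pvInd rc.1 0 + c1 * pvInd rc.1 1 + c2 * pvInd rc.1 2 +
        c3 * pvInd rc.1 3 + c4 * pvInd rc.1 4 + c5 * pvInd rc.1 5 + c6 * pvInd rc.1 6) * rc.2)
      from by funext total rc; exact hinner rc.1 rc.2 total]
  rw [PySem.List.foldl_add]
  simp only [List.map_cons, List.map_nil, List.sum_cons, List.sum_nil]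
  ring

lemma pvB_eq (n : Int) :
    solute_alt n = pvCnt n 0 * pvG n 0 + pvCnt n 1 * pvG n 1 + pvCnt n 2 * pvG n 2 +
      pvCnt n 3 * pvG n 3 + pvCnt n 4 * pvG n 4 + pvCnt n 5 * pvG n 5 + pvCnt n 6 * pvG n 6 := by
  have hfd : ∀ a : Int, PySem.Int.floordiv a 7 = a / 7 := fun a =>
    PySem.Int.floordiv_eq_ediv_of_pos (by norm_num)
  have hm : (if n > 0 then n else 0) = max n 0 := by split_ifs <;> omega
  have hcnt : (PySem.List.pyRange 0 7 1).map (fun r =>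
      PySem.Int.floordiv ((if n > 0 then n else 0) - r) 7 - PySem.Int.floordiv (-r) 7) =
      [pvCnt n 0, pvCnt n 1, pvCnt n 2, pvCnt n 3, pvCnt n 4, pvCnt n 5, pvCnt n 6] := by
    rw [show PySem.List.pyRange 0 7 1 = [0, 1, 2, 3, 4, 5, 6] from by decide]
    simp only [List.map_cons, List.map_nil, hfd, hm]
    unfold pvCnt
    norm_num
  simp only [solute_alt]
  rw [hcnt, pvB_gen, pvG, pvG, pvG, pvG, pvG, pvG, pvG]

-- ===== VERDICT (by name: the statement is the Claim_ definition above) =====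
theorem solute_spec : Claim_equal_solute := by
  intro n _
  unfold Spec_solute
  rw [pvA_eq, pvB_eq]
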